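-- pv_equiv track=rewrite | github.com/abdikadharjama/Python-Toy-Problems | challenge_3.py | solution_challenge_3
-- ===== SOURCE A (Python) =====
-- def solution_challenge_3(N):
--     """
--     Generates a string of length N containing as many different lower-case letters as possible, each occurring an equal number of times.
--
--     Parameters:
--     N (int): The length of the string to generate.
--
--     Returns:
--     str: A string where each letter occurs an equal number of times, or an empty string if not possible.
--     """
--     if N > 26:
--         # Find the highest factor of N that is 26 or lower
--         for factor in range(26, 0, -1):
--             if N % factor == 0:
--                 repeat_count = N // factor
--                 return ''.join([chr(97 + i) * repeat_count for i in range(factor)])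
--     elif N <= 26:
--         return ''.join([chr(97 + i) for i in range(N)])
--
--     return ""
-- ===== SOURCE B (Python) =====
-- def solution_challenge_3(N):
--     if N < 1:
--         return ""
--     # Search repeat counts upward: the smallest k >= ceil(N/26) dividing N
--     # gives the maximal number of distinct letters N // k.
--     k = (N + 25) // 26
--     while N % k:
--         k += 1
--     return ''.join(chr(97 + i // k) for i in range(N))
-- ===== Notes on version B (the rewrite author's own statement) =====
-- stated objective: alternative
-- what changed: B inverts the search: instead of A's fixed downward scan over candidate letter counts 26..1, it searches repeat counts upward from ceil(N/26) with an unbounded while loop for the smallest divisor of N, and builds the string in a single position-indexed pass chr(97 + i // k) instead of joining per-letter blocks.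
import Mathlib
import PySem

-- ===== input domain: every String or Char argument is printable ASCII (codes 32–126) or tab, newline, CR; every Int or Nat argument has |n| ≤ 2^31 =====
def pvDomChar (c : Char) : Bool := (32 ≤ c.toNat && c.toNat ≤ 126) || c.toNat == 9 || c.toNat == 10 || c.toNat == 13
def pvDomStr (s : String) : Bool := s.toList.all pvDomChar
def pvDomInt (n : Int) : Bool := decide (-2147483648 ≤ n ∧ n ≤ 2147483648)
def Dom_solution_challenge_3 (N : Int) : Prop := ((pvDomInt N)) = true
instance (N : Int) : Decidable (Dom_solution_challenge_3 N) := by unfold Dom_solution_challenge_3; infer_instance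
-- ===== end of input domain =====

-- B searches repeat counts upward (smallest k ≥ ceil(N/26) dividing N) instead of A's downward letter-count scan, and builds the string position-indexed; alternative decomposition, same cost.


-- ===== PORT A =====
-- chr(97 + i) * repeat_count  — chr ported by hand (exact here: 97 ≤ 97+i < 123 is valid ASCII)
def pvABlock (repeat_count i : Int) : String :=
  String.ofList (PySem.List.pyRepeat [Char.ofNat (97 + i).toNat] repeat_count)

-- the 'for factor in range(26, 0, -1)' loop; falling off the loop reaches 'return ""'
def pvALoop (N : Int) : List Int → String
  | [] => ""
  | factor :: rest =>
    if PySem.Int.mod N factor = 0 then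
      let repeat_count := PySem.Int.floordiv N factor
      PySem.Str.join "" ((PySem.List.pyRange 0 factor 1).map (pvABlock repeat_count))
    else pvALoop N rest

def solution_challenge_3 (N : Int) : String :=
  if N > 26 then
    pvALoop N (PySem.List.pyRange 26 0 (-1))
  else
    PySem.Str.join "" ((PySem.List.pyRange 0 N 1).map (fun i => String.ofList [Char.ofNat (97 + i).toNat]))

-- ===== PORT B =====
-- the unbounded 'while N % k: k += 1' loop, with fuel N.toNat (enough: k reaches the
-- divisor N after at most N - ceil(N/26) < N.toNat increments; fuel 0 is never reached)
def pvBUp (N : Int) : Nat → Int → Int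
  | 0, k => k
  | fuel + 1, k => if PySem.Int.mod N k = 0 then k else pvBUp N fuel (k + 1)

def solution_challenge_3_alt (N : Int) : String :=
  if N < 1 then ""
  else
    let k := pvBUp N N.toNat (PySem.Int.floordiv (N + 25) 26)
    PySem.Str.join "" ((PySem.List.pyRange 0 N 1).map
      (fun i => String.ofList [Char.ofNat (97 + PySem.Int.floordiv i k).toNat]))

-- ===== PRECONDITION & SPEC =====
def Spec_solution_challenge_3 (N : Int) (out : String) : Prop := out = solution_challenge_3_alt N
instance (N : Int) (out : String) : Decidable (Spec_solution_challenge_3 N out) := by unfold Spec_solution_challenge_3; infer_instance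

-- ===== CLAIM (what is proved, stated in full; the proofs are below) =====
def Claim_equal_solution_challenge_3 : Prop := ∀ (N : Int), Dom_solution_challenge_3 N → Spec_solution_challenge_3 N (solution_challenge_3 N)

-- ===== LEMMAS AND PROOFS =====

-- A's divisor: pvBFindA mirrors pvALoop's search, returning the divisor it stops at (default 1)
def pvBFindA (N : Int) : List Int → Int
  | [] => 1
  | d :: rest => if PySem.Int.mod N d = 0 then d else pvBFindA N rest

theorem pvBFindA_spec (N : Int) (l : List Int) (h : ∃ d ∈ l, PySem.Int.mod N d = 0) :
    pvBFindA N l ∈ l ∧ PySem.Int.mod N (pvBFindA N l) = 0 := by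
  induction l with
  | nil => simp at h
  | cons d rest ih =>
    by_cases hd : PySem.Int.mod N d = 0
    · simp [pvBFindA, hd]
    · obtain ⟨e, he, hme⟩ := h
      rcases List.mem_cons.mp he with rfl | he'
      · exact absurd hme hd
      · have := ih ⟨e, he', hme⟩
        simp [pvBFindA, hd, this.1, this.2]

-- on a strictly descending list, the FIRST divisor found is the LARGEST divisor in the list
theorem pvBFindA_max (N : Int) (l : List Int) (hp : l.Pairwise (· > ·))
    (e : Int) (he : e ∈ l) (hpe : PySem.Int.mod N e = 0) : e ≤ pvBFindA N l := by
  induction l with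
  | nil => simp at he
  | cons d rest ih =>
    by_cases hd : PySem.Int.mod N d = 0
    · rcases List.mem_cons.mp he with rfl | he'
      · simp [pvBFindA, hd]
      · have := (List.pairwise_cons.mp hp).1 e he'
        simp [pvBFindA, hd]; omega
    · rcases List.mem_cons.mp he with rfl | he'
      · exact absurd hpe hd
      · simpa [pvBFindA, hd] using ih (List.pairwise_cons.mp hp).2 he'

-- A's loop returns the block join at the divisor pvBFindA finds
theorem pvALoop_eq (N : Int) (l : List Int) (h : ∃ d ∈ l, PySem.Int.mod N d = 0) :
    pvALoop N l =
      PySem.Str.join "" ((PySem.List.pyRange 0 (pvBFindA N l) 1).map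
        (pvABlock (PySem.Int.floordiv N (pvBFindA N l)))) := by
  induction l with
  | nil => simp at h
  | cons d rest ih =>
    by_cases hd : PySem.Int.mod N d = 0
    · simp [pvALoop, pvBFindA, hd]
    · obtain ⟨e, he, hme⟩ := h
      rcases List.mem_cons.mp he with rfl | he'
      · exact absurd hme hd
      · simpa [pvALoop, pvBFindA, hd] using ih ⟨e, he', hme⟩

-- B's while loop: given enough fuel to reach some divisor, it returns the SMALLEST j ≥ k dividing N
theorem pvBUp_spec (N : Int) (fuel : Nat) (k : Int)
    (h : ∃ j, k ≤ j ∧ j ≤ k + fuel ∧ PySem.Int.mod N j = 0) :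
    PySem.Int.mod N (pvBUp N fuel k) = 0 ∧ k ≤ pvBUp N fuel k ∧
      ∀ j, k ≤ j → j < pvBUp N fuel k → PySem.Int.mod N j ≠ 0 := by
  induction fuel generalizing k with
  | zero =>
    obtain ⟨j, h1, h2, h3⟩ := h
    have hjk : j = k := by push_cast at h2; omega
    subst hjk
    simp only [pvBUp]
    exact ⟨h3, le_refl _, fun j' hj1 hj2 => absurd hj1 (by omega)⟩
  | succ fuel ih =>
    simp only [pvBUp]
    by_cases hk : PySem.Int.mod N k = 0
    · rw [if_pos hk]
      exact ⟨hk, le_refl _, fun j' hj1 hj2 => absurd hj1 (by omega)⟩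
    · rw [if_neg hk]
      obtain ⟨j, h1, h2, h3⟩ := h
      have hjk : j ≠ k := fun hh => hk (hh ▸ h3)
      have := ih (k + 1) ⟨j, by omega, by push_cast at h2 ⊢; omega, h3⟩
      refine ⟨this.1, by omega, ?_⟩
      intro j' hj1 hj2
      rcases eq_or_lt_of_le hj1 with rfl | hlt
      · exact hk
      · exact this.2.2 j' (by omega) hj2

-- core reshaping: d blocks of r copies is the same char list as N = d*r positions mapped through (· / r)
theorem pvBlocks_eq_positions (f : Nat → Char) (d r : Nat) (hr : 0 < r) :
    ((List.range d).map (fun i => List.replicate r (f i))).flatten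
      = (List.range (d * r)).map (fun j => f (j / r)) := by
  induction d with
  | zero => simp
  | succ d ih =>
    rw [List.range_succ, Nat.succ_mul, List.range_add]
    simp only [List.map_append, List.flatten_append, ih]
    congr 1
    simp only [List.map_map, List.map_singleton, List.flatten_cons, List.flatten_nil, List.append_nil]
    symm
    rw [List.eq_replicate_iff]
    refine ⟨by simp, ?_⟩
    intro c hc
    simp only [List.mem_map, Function.comp, List.mem_range] at hc
    obtain ⟨j, hj, rfl⟩ := hc
    rw [Nat.mul_comm d r, Nat.mul_add_div hr, Nat.div_eq_of_lt hj, Nat.add_zero]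

-- ''.join with empty separator is concatenation of the parts
theorem pvJoinNil (xss : List (List Char)) : PySem.Chars.join [] xss = xss.flatten := by
  have h : ∀ yss : List (List Char), (List.intersperse ([] : List Char) yss).flatten = yss.flatten := by
    intro yss
    induction yss with
    | nil => rfl
    | cons a t ih => cases t <;> simp_all [List.intersperse]
  simpa [PySem.Chars.join, List.intercalate] using h xss

-- flatten of singleton blocks is a plain map
theorem pvFlattenSingleton {α β : Type} (f : α → β) (l : List α) :
    (l.map (fun a => [f a])).flatten = l.map f := by
  induction l with
  | nil => rfl
  | cons a t ih => simp [ih]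

-- ===== VERDICT (by name: the statement is the Claim_ definition above) =====
theorem solution_challenge_3_spec : Claim_equal_solution_challenge_3 := by
  intro N _
  unfold Spec_solution_challenge_3
  by_cases h26 : N > 26
  · -- N > 26: A's largest divisor ≤ 26 and B's smallest repeat count ≥ ceil(N/26) are paired by d * k = N
    -- A's side
    have hmem : (1:Int) ∈ PySem.List.pyRange 26 0 (-1) := by decide
    have hone : PySem.Int.mod N 1 = 0 := (PySem.Int.mod_eq_zero_iff_dvd N 1).2 (one_dvd N)
    have hex : ∃ e ∈ PySem.List.pyRange 26 0 (-1), PySem.Int.mod N e = 0 := ⟨1, hmem, hone⟩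
    obtain ⟨hdmem, hdmod⟩ := pvBFindA_spec N _ hex
    set d := pvBFindA N (PySem.List.pyRange 26 0 (-1)) with hd
    have hdb : 1 ≤ d ∧ d ≤ 26 := by
      have hall : ∀ x ∈ PySem.List.pyRange 26 0 (-1), 1 ≤ x ∧ x ≤ 26 := by decide
      exact hall d hdmem
    have hdmax : ∀ e, d < e → e ≤ 26 → ¬ e ∣ N := by
      intro e he1 he2 hdvd
      have hem : e ∈ PySem.List.pyRange 26 0 (-1) := by
        rw [PySem.List.mem_pyRange_neg_one]; omega
      have := pvBFindA_max N _ (by decide) e hem ((PySem.Int.mod_eq_zero_iff_dvd N e).2 hdvd)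
      omega
    obtain ⟨c, hc⟩ := (PySem.Int.mod_eq_zero_iff_dvd N d).1 hdmod
    -- B's side: lo = ceil(N/26)
    set lo := PySem.Int.floordiv (N + 25) 26 with hlo
    have hlob : lo * 26 ≤ N + 25 ∧ N + 25 < (lo + 1) * 26 :=
      (PySem.Int.floordiv_eq_iff_of_pos (a := N + 25) (b := 26) (q := lo) (by omega)).1 rfl
    have hc1 : 1 ≤ c := by nlinarith [hdb.1, hdb.2]
    have hloc : lo ≤ c := by nlinarith [hdb.1, hdb.2]
    have hloN : lo ≤ N := by nlinarith [hdb.1, hdb.2, hc1]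
    have hexB : ∃ j, lo ≤ j ∧ j ≤ lo + (N.toNat : Int) ∧ PySem.Int.mod N j = 0 := by
      refine ⟨N, hloN, by omega, (PySem.Int.mod_eq_zero_iff_dvd N N).2 dvd_rfl⟩
    obtain ⟨hkmod, hklo, hkmin⟩ := pvBUp_spec N N.toNat lo hexB
    set k := pvBUp N N.toNat lo with hk
    obtain ⟨m, hm⟩ := (PySem.Int.mod_eq_zero_iff_dvd N k).1 hkmod
    -- k ≤ c (else c contradicts k's minimality)
    have hkc : k ≤ c := by
      by_contra hh
      exact hkmin c hloc (by omega) ((PySem.Int.mod_eq_zero_iff_dvd N c).2 ⟨d, by linarith [hc, mul_comm d c]⟩)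
    have hk1 : 1 ≤ k := by omega
    -- m = N / k satisfies d ≤ m (from k ≤ c) and m ≤ 26 (from lo ≤ k), so m = d by maximality
    have hm26 : m ≤ 26 := by nlinarith
    have hmd : d ≤ m := by nlinarith [hdb.1, hdb.2, hc1]
    have hmeq : m = d := by
      by_contra hh
      exact hdmax m (by omega) hm26 ⟨k, by linarith [hm, mul_comm k m]⟩
    -- hence N = d * k; now reshape the strings
    have hNdk : N = d * k := by rw [hm, hmeq]; ring
    have hN1 : ¬ N < 1 := by omega
    rw [solution_challenge_3, solution_challenge_3_alt, if_pos h26, if_neg hN1]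
    rw [pvALoop_eq N _ hex, ← hd, ← hlo, ← hk]
    apply String.toList_inj.mp
    rw [PySem.Str.toList_join, PySem.Str.toList_join,
      show ("" : String).toList = ([] : List Char) from rfl, pvJoinNil, pvJoinNil]
    obtain ⟨dn, hdn⟩ : ∃ dn : Nat, d = (dn:Int) := ⟨d.toNat, by omega⟩
    obtain ⟨kn, hkn⟩ : ∃ kn : Nat, k = (kn:Int) := ⟨k.toNat, by omega⟩
    obtain ⟨Nn, hNn⟩ : ∃ Nn : Nat, N = (Nn:Int) := ⟨N.toNat, by omega⟩
    have hmul : dn * kn = Nn := by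
      have := hNdk; rw [hdn, hkn, hNn] at this; exact_mod_cast this.symm
    have hknpos : 0 < kn := by omega
    have hrr : PySem.Int.floordiv N d = ((Nn / dn : Nat) : Int) := by
      rw [hdn, hNn]; exact PySem.Int.floordiv_natCast Nn dn
    have hNdiv : Nn / dn = kn := by
      rw [← hmul]; exact Nat.mul_div_cancel_left kn (by omega)
    rw [hrr, hNdiv, hdn, hNn, PySem.List.pyRange_zero_natCast, PySem.List.pyRange_zero_natCast]
    simp only [List.map_map, Function.comp_def, pvABlock, PySem.List.pyRepeat_singleton,
      String.toList_ofList, Int.toNat_natCast, hkn, PySem.Int.floordiv_natCast]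
    rw [pvBlocks_eq_positions (fun j => Char.ofNat (97 + (j:Int)).toNat) dn kn hknpos, hmul]
    rw [pvFlattenSingleton]
  · by_cases h1 : N < 1
    · -- N ≤ 0: both produce ""
      have hr : PySem.List.pyRange 0 N 1 = [] := by simp [PySem.List.pyRange]; omega
      rw [solution_challenge_3, solution_challenge_3_alt, if_neg h26, if_pos h1, hr]
      decide
    · -- 1 ≤ N ≤ 26: finitely many values, checked by computation
      have hlo : (1:Int) ≤ N := by omega
      have hhi : N ≤ 26 := by omega
      interval_cases N <;> decide
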